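-- pv_equiv track=rewrite | github.com/IBM-Security/directory | server/tools/replication/parse_topology.py | GetReplAgreementSubentryDN
-- ===== SOURCE A (Python) =====
-- def GetReplAgreementSubentryDN(newListContext, replobject):
--     newreplobject = []
--     finalreplobject = []
--
--     for ro in replobject:
--         for o in ro:
--             for key, value in o.items():
--                 if (key == "dn"):
--                     newreplobject.append(dict([(value, ro)]))
--
--     for context in newListContext:
--         currentContext = context.strip().lower()
--         for ro in newreplobject:
--             for replContext, replob in ro.items():
--                 if (currentContext in replContext.strip()):
--                     finalreplobject.append(dict([(currentContext, replob)]))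
--     return finalreplobject
-- ===== SOURCE B (Python) =====
-- def GetReplAgreementSubentryDN(newListContext, replobject):
--     # Same result as the original, but without materializing the {dn: ro}
--     # index list first: each context scans the raw nested structure directly.
--     finalreplobject = []
--     for context in newListContext:
--         currentContext = context.strip().lower()
--         for ro in replobject:
--             for o in ro:
--                 for key, value in o.items():
--                     if key == "dn" and currentContext in value.strip():
--                         finalreplobject.append(dict([(currentContext, ro)]))
--     return finalreplobject
-- ===== Notes on version B (the rewrite author's own statement) =====
-- stated objective: simpler
-- what changed: Eliminates the intermediate newreplobject index (the first triple loop and the singleton {dn: ro} dicts) entirely; each context scans the raw nested structure directly, yielding the same appends in the same order, trading the precomputed index for a rescan per context.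
import Mathlib
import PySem

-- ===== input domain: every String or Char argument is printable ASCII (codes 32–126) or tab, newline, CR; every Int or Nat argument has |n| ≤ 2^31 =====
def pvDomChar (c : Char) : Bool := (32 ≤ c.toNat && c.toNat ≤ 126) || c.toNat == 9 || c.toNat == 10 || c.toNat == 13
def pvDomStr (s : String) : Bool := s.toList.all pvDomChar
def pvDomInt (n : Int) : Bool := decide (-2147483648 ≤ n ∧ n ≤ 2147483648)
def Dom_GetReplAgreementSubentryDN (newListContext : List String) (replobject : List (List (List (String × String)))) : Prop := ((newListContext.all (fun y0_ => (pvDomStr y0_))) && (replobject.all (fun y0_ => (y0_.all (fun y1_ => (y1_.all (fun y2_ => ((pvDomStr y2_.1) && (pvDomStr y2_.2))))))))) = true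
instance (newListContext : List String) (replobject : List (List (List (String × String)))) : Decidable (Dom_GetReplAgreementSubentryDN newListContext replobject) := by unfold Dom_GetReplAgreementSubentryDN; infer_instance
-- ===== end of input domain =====

-- ===== PORT A =====
-- B drops the precomputed {dn: ro} index; same appends in the same order per context (objective: simpler).
def GetReplAgreementSubentryDN (newListContext : List String) (replobject : List (List (List (String × String)))) : List (List (String × List (List (String × String)))) :=
  let newreplobject : List (List (String × List (List (String × String)))) :=
    replobject.foldl (fun acc ro =>
      ro.foldl (fun acc o =>
        (PySem.Dict.ofList o).items.foldl (fun acc kv =>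
          if kv.1 == "dn" then acc ++ [[(kv.2, ro)]] else acc) acc) acc) []
  newListContext.foldl (fun acc context =>
    let currentContext := PySem.Str.lower (PySem.Str.strip context)
    newreplobject.foldl (fun acc ro =>
      ro.foldl (fun acc p =>
        if PySem.Str.isIn currentContext (PySem.Str.strip p.1) then acc ++ [[(currentContext, p.2)]] else acc) acc) acc) []

-- ===== PORT B =====
def GetReplAgreementSubentryDN_alt (newListContext : List String) (replobject : List (List (List (String × String)))) : List (List (String × List (List (String × String)))) :=
  newListContext.foldl (fun acc context =>
    let currentContext := PySem.Str.lower (PySem.Str.strip context)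
    replobject.foldl (fun acc ro =>
      ro.foldl (fun acc o =>
        (PySem.Dict.ofList o).items.foldl (fun acc kv =>
          if kv.1 == "dn" && PySem.Str.isIn currentContext (PySem.Str.strip kv.2) then acc ++ [[(currentContext, ro)]] else acc) acc) acc) acc) []

-- ===== PRECONDITION & SPEC =====
def Spec_GetReplAgreementSubentryDN (newListContext : List String) (replobject : List (List (List (String × String)))) (out : List (List (String × List (List (String × String))))) : Prop := out = GetReplAgreementSubentryDN_alt newListContext replobject
instance (newListContext : List String) (replobject : List (List (List (String × String)))) (out : List (List (String × List (List (String × String))))) : Decidable (Spec_GetReplAgreementSubentryDN newListContext replobject out) := by unfold Spec_GetReplAgreementSubentryDN; infer_instance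

-- ===== CLAIM (what is proved, stated in full; the proofs are below) =====
def Claim_equal_GetReplAgreementSubentryDN : Prop := ∀ (newListContext : List String) (replobject : List (List (List (String × String)))), Dom_GetReplAgreementSubentryDN newListContext replobject → Spec_GetReplAgreementSubentryDN newListContext replobject (GetReplAgreementSubentryDN newListContext replobject)

-- ===== LEMMAS AND PROOFS =====

-- the index list A's first loop builds, as a flatMap
def pvIdx (replobject : List (List (List (String × String)))) : List (List (String × List (List (String × String)))) :=
  replobject.flatMap (fun ro => ro.flatMap (fun o =>
    ((PySem.Dict.ofList o).items.filter (fun kv => kv.1 == "dn")).map (fun kv => [(kv.2, ro)])))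

theorem idx_eq (replobject : List (List (List (String × String)))) (acc : List (List (String × List (List (String × String))))) :
    replobject.foldl (fun acc ro =>
      ro.foldl (fun acc o =>
        (PySem.Dict.ofList o).items.foldl (fun acc kv =>
          if kv.1 == "dn" then acc ++ [[(kv.2, ro)]] else acc) acc) acc) acc
    = acc ++ pvIdx replobject := by
  unfold pvIdx
  rw [← PySem.List.foldl_append_eq_flatMap]
  apply PySem.List.foldl_congr_mem
  intro acc ro _
  rw [← PySem.List.foldl_append_eq_flatMap]
  apply PySem.List.foldl_congr_mem
  intro acc o _
  rw [PySem.List.foldl_append_if]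

-- for one fixed context: A's scan of the index list = B's direct nested scan
set_option maxHeartbeats 1000000 in
theorem perContext_eq (replobject : List (List (List (String × String)))) (cc : String)
    (acc : List (List (String × List (List (String × String))))) :
    (pvIdx replobject).foldl (fun acc ro =>
      ro.foldl (fun acc p =>
        if PySem.Str.isIn cc (PySem.Str.strip p.1) then acc ++ [[(cc, p.2)]] else acc) acc) acc
    = replobject.foldl (fun acc ro =>
      ro.foldl (fun acc o =>
        (PySem.Dict.ofList o).items.foldl (fun acc kv =>
          if kv.1 == "dn" && PySem.Str.isIn cc (PySem.Str.strip kv.2) then acc ++ [[(cc, ro)]] else acc) acc) acc) acc := by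
  unfold pvIdx
  rw [List.foldl_flatMap]
  apply PySem.List.foldl_congr_mem
  intro acc ro _
  rw [List.foldl_flatMap]
  apply PySem.List.foldl_congr_mem
  intro acc o _
  rw [List.foldl_map]
  simp only [List.foldl_cons, List.foldl_nil]
  rw [PySem.List.foldl_append_if, PySem.List.foldl_append_if, List.filter_filter]
  congr 1
  rw [show (fun (a : String × String) => PySem.Str.isIn cc (PySem.Str.strip a.2) && (a.1 == "dn"))
      = (fun (a : String × String) => (a.1 == "dn") && PySem.Str.isIn cc (PySem.Str.strip a.2)) from
    funext fun a => Bool.and_comm _ _]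

-- ===== VERDICT (by name: the statement is the Claim_ definition above) =====
theorem GetReplAgreementSubentryDN_spec : Claim_equal_GetReplAgreementSubentryDN := by
  intro newListContext replobject _
  unfold Spec_GetReplAgreementSubentryDN GetReplAgreementSubentryDN GetReplAgreementSubentryDN_alt
  rw [idx_eq replobject []]
  simp only [List.nil_append]
  apply PySem.List.foldl_congr_mem
  intro acc context _
  exact perContext_eq replobject (PySem.Str.lower (PySem.Str.strip context)) acc
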